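-- pv_equiv track=rewrite | github.com/bogdan824/LeetCode-Problems_01 | 1239. MAx_len_concatenated.py | maxLengh
-- ===== SOURCE A (Python) =====
-- def maxLengh(arr):
-- 	stor = []
-- 	stor.append("")
-- 	for a in range (len(arr)):
-- 		stor.append(arr[a])
-- 	for i in range (len(arr)-1):
-- 		for j in range (1,len(arr)):
-- 			if arr[i] != arr[j]:
-- 				stor.append(arr[i]+arr[j])
-- 	maxi = ""
-- 	for b in range (len(stor)):
-- 		if (len(stor[b])) > len(maxi):
-- 			maxi = stor[b]
-- 	return len(maxi)
-- ===== SOURCE B (Python) =====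
-- def maxLengh(arr):
--     # one pass: top-2 lengths among DISTINCT string values (any two distinct
--     # values can be paired), instead of A's O(n^2) concatenation of all pairs
--     m1 = m2 = -1
--     seen = set()
--     for s in arr:
--         if s in seen:
--             continue
--         seen.add(s)
--         L = len(s)
--         if L > m1:
--             m1, m2 = L, m1
--         elif L > m2:
--             m2 = L
--     if m1 < 0:
--         return 0
--     return m1 + m2 if m2 >= 0 else m1
-- ===== Notes on version B (the rewrite author's own statement) =====
-- stated objective: faster
-- what changed: A materialises every concatenation of unequal pairs (O(n^2) strings) and then scans for the longest; B makes one pass keeping a seen-set and the two largest lengths among distinct string values, returning m1+m2 (or m1, or 0).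
import Mathlib
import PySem

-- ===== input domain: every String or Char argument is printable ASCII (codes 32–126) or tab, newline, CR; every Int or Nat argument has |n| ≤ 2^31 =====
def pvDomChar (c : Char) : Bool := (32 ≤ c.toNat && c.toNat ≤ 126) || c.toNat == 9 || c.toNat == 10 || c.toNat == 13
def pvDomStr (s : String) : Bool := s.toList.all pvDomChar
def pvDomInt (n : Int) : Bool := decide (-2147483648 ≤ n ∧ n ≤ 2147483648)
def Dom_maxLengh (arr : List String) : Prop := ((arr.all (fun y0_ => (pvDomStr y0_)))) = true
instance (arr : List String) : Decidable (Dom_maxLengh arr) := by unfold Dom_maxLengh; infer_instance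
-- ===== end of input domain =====

-- B replaces A's quadratic enumeration of all concatenated pairs by a single pass
-- tracking the two largest lengths among distinct string values (objective: faster).


-- ===== PORT A =====
def maxLengh (arr : List String) : Int :=
  let stor : List String := []
  let stor := stor ++ [""]
  let stor := (PySem.List.pyRange 0 (PySem.List.len arr) 1).foldl
    (fun st a => st ++ [PySem.List.pyGetD arr a ""]) stor
  let stor := (PySem.List.pyRange 0 (PySem.List.len arr - 1) 1).foldl
    (fun st i => (PySem.List.pyRange 1 (PySem.List.len arr) 1).foldl
      (fun st j =>
        if PySem.List.pyGetD arr i "" ≠ PySem.List.pyGetD arr j "" then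
          st ++ [PySem.List.pyGetD arr i "" ++ PySem.List.pyGetD arr j ""]
        else st) st) stor
  let maxi := (PySem.List.pyRange 0 (PySem.List.len stor) 1).foldl
    (fun m b =>
      if PySem.Str.len m < PySem.Str.len (PySem.List.pyGetD stor b "") then
        PySem.List.pyGetD stor b "" else m) ""
  PySem.Str.len maxi

-- ===== PORT B =====
-- one pass: `seen` = set of values already processed, (m1, m2) = two largest
-- lengths among distinct values so far (-1 = absent), exactly as in Source B
def maxLenghAltStep (st : PySem.Set String × Int × Int) (s : String) :
    PySem.Set String × Int × Int :=
  if PySem.Set.contains st.1 s then st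
  else
    let seen := PySem.Set.add st.1 s
    let L := PySem.Str.len s
    if st.2.1 < L then (seen, L, st.2.1)
    else if st.2.2 < L then (seen, st.2.1, L)
    else (seen, st.2.1, st.2.2)

def maxLengh_alt (arr : List String) : Int :=
  let r := arr.foldl maxLenghAltStep (PySem.Set.empty, -1, -1)
  if r.2.1 < 0 then 0
  else if 0 ≤ r.2.2 then r.2.1 + r.2.2
  else r.2.1

-- ===== PRECONDITION & SPEC =====
def Spec_maxLengh (arr : List String) (out : Int) : Prop := out = maxLengh_alt arr
instance (arr : List String) (out : Int) : Decidable (Spec_maxLengh arr out) := by unfold Spec_maxLengh; infer_instance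

-- ===== CLAIM (what is proved, stated in full; the proofs are below) =====
def Claim_equal_maxLengh : Prop := ∀ (arr : List String), Dom_maxLengh arr → Spec_maxLengh arr (maxLengh arr)

-- ===== LEMMAS AND PROOFS =====

-- A's pair candidates, as the list A appends in its double loop
def pairsOf (arr : List String) : List String :=
  arr.dropLast.flatMap (fun x =>
    ((arr.drop 1).filter (fun y => decide (x ≠ y))).map (fun y => x ++ y))

-- length of A's max-picking fold = running max of lengths
theorem len_foldl_pick (l : List String) (m : String) :
    PySem.Str.len (l.foldl
      (fun m s => if PySem.Str.len m < PySem.Str.len s then s else m) m) =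
    l.foldl (fun acc s => max acc (PySem.Str.len s)) (PySem.Str.len m) := by
  induction l generalizing m with
  | nil => rfl
  | cons s t ih =>
    simp only [List.foldl_cons]
    rw [ih]
    by_cases h : PySem.Str.len m < PySem.Str.len s
    · rw [if_pos h, max_eq_right (le_of_lt h)]
    · rw [if_neg h, max_eq_left (le_of_not_gt h)]

-- a 'for i in range(len(arr)-1)' loop reading arr[i] is a loop over arr.dropLast
theorem foldl_range_dropLast {β : Type} (arr : List String) (g : β → String → β) (init : β) :
    (PySem.List.pyRange 0 ((arr.length : Int) - 1)).foldl
      (fun st i => g st (PySem.List.pyGetD arr i "")) init =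
    arr.dropLast.foldl g init := by
  rcases eq_or_ne arr [] with rfl | hne
  · rfl
  · have hpos : 0 < arr.length := List.length_pos_iff.2 hne
    have h1 : ((arr.length : Int) - 1) = (arr.dropLast.length : Int) := by
      rw [List.length_dropLast]; omega
    rw [h1,
      PySem.List.foldl_congr_mem _ _
        (fun st i => g st (PySem.List.pyGetD arr.dropLast i "")) init ?_,
      PySem.List.foldl_pyRange_zero_pyGetD' arr.dropLast "" g init]
    intro acc x hx
    rw [PySem.List.mem_pyRange_one] at hx
    have hxl : x < (arr.dropLast.length : Int) := hx.2
    have hxl' : x.toNat < arr.dropLast.length := by omega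
    have hxa : x < (arr.length : Int) := by
      rw [List.length_dropLast] at hxl; omega
    congr 1
    rw [PySem.List.pyGetD_eq_getElem _ _ hx.1 hxa,
        PySem.List.pyGetD_eq_getElem _ _ hx.1 hxl]
    simp [List.getElem_dropLast]

-- A's inner 'for j in range(1, len(arr))' loop, as filter + map over arr.drop 1
theorem innerA (arr : List String) (x : String) (st : List String) :
    (PySem.List.pyRange 1 ((arr.length : Int))).foldl
      (fun st j => if x ≠ PySem.List.pyGetD arr j "" then
        st ++ [x ++ PySem.List.pyGetD arr j ""] else st) st
    = st ++ ((arr.drop 1).filter (fun y => decide (x ≠ y))).map (fun y => x ++ y) := by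
  rw [PySem.List.foldl_pyRange_pyGetD' arr ""
      (fun st y => if x ≠ y then st ++ [x ++ y] else st) st (by norm_num)]
  rw [PySem.List.foldl_append_ite (fun y => x ≠ y) (fun y => x ++ y)]
  norm_num

theorem str_len_empty : PySem.Str.len "" = 0 := by decide

-- A computes the max of 0, the lengths of arr and the lengths of pairsOf arr
theorem maxLengh_eq (arr : List String) :
    maxLengh arr = ([""] ++ arr ++ pairsOf arr).foldl
      (fun acc s => max acc (PySem.Str.len s)) 0 := by
  unfold maxLengh
  simp only [PySem.List.len_eq]
  rw [PySem.List.foldl_pyRange_zero_pyGetD' arr "" (fun st x => st ++ [x]) ([] ++ [""]),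
      PySem.List.foldl_append_singleton_eq_self, List.nil_append,
      foldl_range_dropLast arr
        (fun st x => (PySem.List.pyRange 1 ((arr.length : Int))).foldl
          (fun st j => if x ≠ PySem.List.pyGetD arr j "" then
            st ++ [x ++ PySem.List.pyGetD arr j ""] else st) st) ([""] ++ arr),
      PySem.List.foldl_congr_mem arr.dropLast _
        (fun st x => st ++ ((arr.drop 1).filter (fun y => decide (x ≠ y))).map (fun y => x ++ y))
        ([""] ++ arr) (fun acc x _ => innerA arr x acc),
      PySem.List.foldl_append_eq_flatMap
        (fun x => ((arr.drop 1).filter (fun y => decide (x ≠ y))).map (fun y => x ++ y)),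
      PySem.List.foldl_pyRange_zero_pyGetD' _ ""
        (fun m s => if PySem.Str.len m < PySem.Str.len s then s else m) "",
      len_foldl_pick, str_len_empty]
  rfl

-- invariant of B's fold: (a, b) are the top two of the multiset -1, -1, lengths of seen
def InvB (seen : List String) (a b : Int) : Prop :=
  b ≤ a ∧ ∃ rest : Multiset Int,
    (-1 : Int) ::ₘ (-1 : Int) ::ₘ (↑(seen.map PySem.Str.len) : Multiset Int) = a ::ₘ b ::ₘ rest ∧
    ∀ x ∈ rest, x ≤ b

theorem str_len_nonneg (s : String) : 0 ≤ PySem.Str.len s := by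
  rw [PySem.Str.len_eq]; positivity

theorem cons_rotate (u v x y : Int) (W : Multiset Int) :
    u ::ₘ v ::ₘ x ::ₘ y ::ₘ W = x ::ₘ y ::ₘ u ::ₘ v ::ₘ W := by
  rw [Multiset.cons_swap v x, Multiset.cons_swap u x, Multiset.cons_swap v y,
      Multiset.cons_swap u y]

theorem InvB_push {seen : List String} {a b : Int} (hinv : InvB seen a b) (s : String) :
    InvB (seen ++ [s]) (if a < PySem.Str.len s then PySem.Str.len s else a)
      (if a < PySem.Str.len s then a
       else if b < PySem.Str.len s then PySem.Str.len s else b) := by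
  obtain ⟨hab, rest, heq, hrest⟩ := hinv
  have key : ((-1 : Int) ::ₘ (-1 : Int) ::ₘ (↑((seen ++ [s]).map PySem.Str.len) : Multiset Int))
      = PySem.Str.len s ::ₘ a ::ₘ b ::ₘ rest := by
    have h1 : ((seen ++ [s]).map PySem.Str.len : List Int)
        = seen.map PySem.Str.len ++ [PySem.Str.len s] := by simp
    have h2 : ((seen.map PySem.Str.len ++ [PySem.Str.len s] : List Int) : Multiset Int)
        = PySem.Str.len s ::ₘ ↑(seen.map PySem.Str.len) :=
      Multiset.coe_eq_coe.2 (List.perm_append_singleton _ _)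
    rw [h1, h2, Multiset.cons_swap (-1) (PySem.Str.len s),
        Multiset.cons_swap (-1) (PySem.Str.len s), heq]
  by_cases h1 : a < PySem.Str.len s
  · refine ⟨by rw [if_pos h1, if_pos h1]; exact le_of_lt h1, b ::ₘ rest, ?_, ?_⟩
    · rw [if_pos h1, if_pos h1, key]
    · rw [if_pos h1]
      intro x hx
      rcases Multiset.mem_cons.1 hx with rfl | hx
      · exact hab
      · exact (hrest x hx).trans hab
  · by_cases h2 : b < PySem.Str.len s
    · refine ⟨by rw [if_neg h1, if_neg h1, if_pos h2]; exact le_of_not_gt h1,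
        b ::ₘ rest, ?_, ?_⟩
      · rw [if_neg h1, if_neg h1, if_pos h2, key, Multiset.cons_swap]
      · rw [if_neg h1, if_pos h2]
        intro x hx
        rcases Multiset.mem_cons.1 hx with rfl | hx
        · exact le_of_lt h2
        · exact (hrest x hx).trans (le_of_lt h2)
    · refine ⟨by rw [if_neg h1, if_neg h1, if_neg h2]; exact hab,
        PySem.Str.len s ::ₘ rest, ?_, ?_⟩
      · rw [if_neg h1, if_neg h1, if_neg h2, key,
          show PySem.Str.len s ::ₘ a ::ₘ b ::ₘ rest = a ::ₘ b ::ₘ PySem.Str.len s ::ₘ rest by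
            rw [Multiset.cons_swap (PySem.Str.len s) a, Multiset.cons_swap (PySem.Str.len s) b]]
      · rw [if_neg h1, if_neg h2]
        intro x hx
        rcases Multiset.mem_cons.1 hx with rfl | hx
        · exact le_of_not_gt h2
        · exact hrest x hx

theorem bfold (l : List String) (seen : PySem.Set String) (a b : Int)
    (hinv : InvB seen a b) (hnd : seen.Nodup) :
    InvB (l.foldl maxLenghAltStep (seen, a, b)).1
        (l.foldl maxLenghAltStep (seen, a, b)).2.1
        (l.foldl maxLenghAltStep (seen, a, b)).2.2 ∧
    (l.foldl maxLenghAltStep (seen, a, b)).1.Nodup ∧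
    (∀ x, x ∈ (l.foldl maxLenghAltStep (seen, a, b)).1 ↔ x ∈ seen ∨ x ∈ l) := by
  induction l generalizing seen a b with
  | nil => exact ⟨hinv, hnd, fun x => by simp⟩
  | cons s t ih =>
    simp only [List.foldl_cons]
    by_cases hc : PySem.Set.contains seen s = true
    · have hsm : s ∈ seen := (PySem.Set.contains_iff seen s).1 hc
      have step_eq : maxLenghAltStep (seen, a, b) s = (seen, a, b) := by
        simp only [maxLenghAltStep]
        rw [if_pos hc]
      rw [step_eq]
      obtain ⟨i1, i2, i3⟩ := ih seen a b hinv hnd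
      refine ⟨i1, i2, fun x => ?_⟩
      rw [i3]
      constructor
      · rintro (h | h)
        · exact Or.inl h
        · exact Or.inr (List.mem_cons_of_mem _ h)
      · rintro (h | h)
        · exact Or.inl h
        · rcases List.mem_cons.1 h with rfl | h
          · exact Or.inl hsm
          · exact Or.inr h
    · have hsm : s ∉ seen := fun h => hc ((PySem.Set.contains_iff seen s).2 h)
      have hcf : PySem.Set.contains seen s = false := by
        simpa using hc
      have step_eq : maxLenghAltStep (seen, a, b) s =
          (seen ++ [s], (if a < PySem.Str.len s then PySem.Str.len s else a),
           (if a < PySem.Str.len s then a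
            else if b < PySem.Str.len s then PySem.Str.len s else b)) := by
        have hadd : PySem.Set.add seen s = seen ++ [s] := by
          simp only [PySem.Set.add]
          rw [if_neg hc]
        simp only [maxLenghAltStep]
        rw [if_neg hc]
        simp only [hadd]
        split_ifs <;> rfl
      rw [step_eq]
      have hnd' : (seen ++ [s]).Nodup := by
        refine List.Nodup.append hnd (List.nodup_singleton s) ?_
        intro x hx hxs
        rw [List.mem_singleton] at hxs
        exact hsm (hxs ▸ hx)
      obtain ⟨i1, i2, i3⟩ := ih _ _ _ (InvB_push ⟨hinv.1, hinv.2⟩ s) hnd'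
      refine ⟨i1, i2, fun x => ?_⟩
      rw [i3]
      simp only [List.mem_append, List.mem_cons]
      tauto

-- any two entries of a top-two-shaped multiset are bounded by (a, b)
theorem pair_min_le {x y a b : Int} {z rest : Multiset Int} (hab : b ≤ a)
    (hrest : ∀ w ∈ rest, w ≤ b)
    (h : x ::ₘ y ::ₘ z = a ::ₘ b ::ₘ rest) :
    min x y ≤ b ∧ x ≤ a ∧ y ≤ a := by
  have hmem : ∀ w : Int, w ∈ (x ::ₘ y ::ₘ z) → w ≤ a := by
    intro w hw
    rw [h] at hw
    rcases Multiset.mem_cons.1 hw with rfl | hw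
    · exact le_refl _
    rcases Multiset.mem_cons.1 hw with rfl | hw
    · exact hab
    · exact (hrest w hw).trans hab
  refine ⟨?_, hmem x (by simp), hmem y (by simp)⟩
  by_contra hmin
  have hmin' : b < min x y := lt_of_not_ge hmin
  have hx : b < x := lt_of_lt_of_le hmin' (min_le_left _ _)
  have hy : b < y := lt_of_lt_of_le hmin' (min_le_right _ _)
  have hc := congrArg (Multiset.countP (fun w => b < w)) h
  have hz : Multiset.countP (fun w => b < w) rest = 0 := by
    rw [Multiset.countP_eq_zero]
    intro w hw
    exact not_lt_of_ge (hrest w hw)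
  rw [Multiset.countP_cons, Multiset.countP_cons, Multiset.countP_cons,
      Multiset.countP_cons, hz] at hc
  rw [if_pos hx, if_pos hy, if_neg (lt_irrefl b)] at hc
  split_ifs at hc <;> omega

theorem mem_le_a {seen : List String} {a b : Int} (hinv : InvB seen a b)
    {s : String} (hs : s ∈ seen) : PySem.Str.len s ≤ a := by
  obtain ⟨hab, rest, heq, hrest⟩ := hinv
  have hm : PySem.Str.len s ∈
      ((-1 : Int) ::ₘ (-1 : Int) ::ₘ (↑(seen.map PySem.Str.len) : Multiset Int)) := by
    rw [Multiset.mem_cons, Multiset.mem_cons]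
    right; right
    exact Multiset.mem_coe.2 (List.mem_map_of_mem hs)
  rw [heq] at hm
  rcases Multiset.mem_cons.1 hm with h1 | hm
  · omega
  rcases Multiset.mem_cons.1 hm with h1 | hm
  · omega
  · exact (hrest _ hm).trans hab

-- decompose seen's length multiset once s ≠ t are both members
theorem seen_two {seen : List String} {s t : String} (hs : s ∈ seen) (ht : t ∈ seen)
    (hne : s ≠ t) : ∃ W : Multiset Int,
    (↑(seen.map PySem.Str.len) : Multiset Int) = PySem.Str.len s ::ₘ PySem.Str.len t ::ₘ W := by
  have hsm : s ∈ (↑seen : Multiset String) := Multiset.mem_coe.2 hs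
  have h1 : (↑seen : Multiset String) = s ::ₘ (↑seen : Multiset String).erase s :=
    (Multiset.cons_erase hsm).symm
  have htm : t ∈ (↑seen : Multiset String).erase s :=
    (Multiset.mem_erase_of_ne (Ne.symm hne)).2 (Multiset.mem_coe.2 ht)
  have h2 : (↑seen : Multiset String).erase s
      = t ::ₘ ((↑seen : Multiset String).erase s).erase t :=
    (Multiset.cons_erase htm).symm
  refine ⟨Multiset.map PySem.Str.len (((↑seen : Multiset String).erase s).erase t), ?_⟩
  calc (↑(seen.map PySem.Str.len) : Multiset Int)
      = Multiset.map PySem.Str.len (↑seen : Multiset String) := rfl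
    _ = Multiset.map PySem.Str.len (s ::ₘ (↑seen : Multiset String).erase s) :=
        congrArg _ h1
    _ = PySem.Str.len s ::ₘ Multiset.map PySem.Str.len ((↑seen : Multiset String).erase s) :=
        Multiset.map_cons _ _ _
    _ = PySem.Str.len s ::ₘ Multiset.map PySem.Str.len
          (t ::ₘ ((↑seen : Multiset String).erase s).erase t) :=
        congrArg (fun m => PySem.Str.len s ::ₘ Multiset.map PySem.Str.len m) h2
    _ = PySem.Str.len s ::ₘ PySem.Str.len t ::ₘ Multiset.map PySem.Str.len
          (((↑seen : Multiset String).erase s).erase t) := by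
        rw [Multiset.map_cons]

theorem pair_facts {seen : List String} {a b : Int} (hinv : InvB seen a b)
    {s t : String} (hs : s ∈ seen) (ht : t ∈ seen) (hne : s ≠ t) :
    PySem.Str.len s + PySem.Str.len t ≤ a + b ∧ 0 ≤ b := by
  obtain ⟨hab, rest, heq, hrest⟩ := hinv
  obtain ⟨W, hW⟩ := seen_two hs ht hne
  rw [hW, cons_rotate] at heq
  obtain ⟨hmin, hxa, hya⟩ := pair_min_le hab hrest heq
  have h0s := str_len_nonneg s
  have h0t := str_len_nonneg t
  constructor
  · rcases le_total (PySem.Str.len s) (PySem.Str.len t) with hle | hle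
    · have : PySem.Str.len s ≤ b := by
        rw [min_eq_left hle] at hmin; exact hmin
      omega
    · have : PySem.Str.len t ≤ b := by
        rw [min_eq_right hle] at hmin; exact hmin
      omega
  · rcases le_total (PySem.Str.len s) (PySem.Str.len t) with hle | hle
    · rw [min_eq_left hle] at hmin; omega
    · rw [min_eq_right hle] at hmin; omega

theorem a_attained {seen : List String} {a b : Int} (hinv : InvB seen a b)
    (ha : 0 ≤ a) : ∃ s ∈ seen, PySem.Str.len s = a := by
  obtain ⟨hab, rest, heq, hrest⟩ := hinv
  have : a ∈ ((-1 : Int) ::ₘ (-1 : Int) ::ₘ (↑(seen.map PySem.Str.len) : Multiset Int)) := by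
    rw [heq]; simp
  rcases Multiset.mem_cons.1 this with h1 | this
  · omega
  rcases Multiset.mem_cons.1 this with h1 | this
  · omega
  · obtain ⟨s, hsmem, hslen⟩ := List.mem_map.1 (Multiset.mem_coe.1 this)
    exact ⟨s, hsmem, hslen⟩

theorem ab_attained {seen : List String} {a b : Int} (hinv : InvB seen a b)
    (hnd : seen.Nodup) (hb : 0 ≤ b) :
    ∃ s t, s ∈ seen ∧ t ∈ seen ∧ s ≠ t ∧
      PySem.Str.len s + PySem.Str.len t = a + b := by
  obtain ⟨hab, rest, heq, hrest⟩ := hinv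
  have ha : 0 ≤ a := hb.trans hab
  -- both -1 pads land inside rest
  have hlens0 : Multiset.count (-1 : Int) (↑(seen.map PySem.Str.len) : Multiset Int) = 0 := by
    rw [Multiset.count_eq_zero]
    intro hmem
    obtain ⟨s, _, hslen⟩ := List.mem_map.1 (Multiset.mem_coe.1 hmem)
    have := str_len_nonneg s
    omega
  have hcount := congrArg (Multiset.count (-1 : Int)) heq
  rw [Multiset.count_cons_self, Multiset.count_cons_self, hlens0,
      Multiset.count_cons, Multiset.count_cons] at hcount
  rw [if_neg (by omega : ¬ (-1 : Int) = a), if_neg (by omega : ¬ (-1 : Int) = b)] at hcount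
  have hm1 : (-1 : Int) ∈ rest := Multiset.count_pos.1 (by omega)
  obtain ⟨r1, hr1⟩ := Multiset.exists_cons_of_mem hm1
  have hm2 : (-1 : Int) ∈ r1 := by
    rw [hr1, Multiset.count_cons_self] at hcount
    exact Multiset.count_pos.1 (by omega)
  obtain ⟨r2, hr2⟩ := Multiset.exists_cons_of_mem hm2
  rw [hr1, hr2, cons_rotate] at heq
  -- cancel the two -1s
  have heq2 : (↑(seen.map PySem.Str.len) : Multiset Int) = a ::ₘ b ::ₘ r2 := by
    have := (Multiset.cons_inj_right (-1 : Int)).1 ((Multiset.cons_inj_right (-1 : Int)).1 heq)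
    exact this
  -- a is a length of some member
  have hamem : a ∈ (↑(seen.map PySem.Str.len) : Multiset Int) := by rw [heq2]; simp
  obtain ⟨s, hsmem, hslen⟩ := List.mem_map.1 (Multiset.mem_coe.1 hamem)
  -- remove s, then b is a length of another member
  have hsm : s ∈ (↑seen : Multiset String) := Multiset.mem_coe.2 hsmem
  have hsplit : (↑seen : Multiset String) = s ::ₘ (↑seen : Multiset String).erase s :=
    (Multiset.cons_erase hsm).symm
  have hmap : (↑(seen.map PySem.Str.len) : Multiset Int)
      = PySem.Str.len s ::ₘ Multiset.map PySem.Str.len ((↑seen : Multiset String).erase s) :=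
    calc (↑(seen.map PySem.Str.len) : Multiset Int)
        = Multiset.map PySem.Str.len (↑seen : Multiset String) := rfl
      _ = Multiset.map PySem.Str.len (s ::ₘ (↑seen : Multiset String).erase s) :=
          congrArg _ hsplit
      _ = PySem.Str.len s ::ₘ Multiset.map PySem.Str.len ((↑seen : Multiset String).erase s) :=
          Multiset.map_cons _ _ _
  rw [hmap, hslen] at heq2
  have heq3 : Multiset.map PySem.Str.len ((↑seen : Multiset String).erase s) = b ::ₘ r2 :=
    (Multiset.cons_inj_right a).1 heq2
  have hbmem : b ∈ Multiset.map PySem.Str.len ((↑seen : Multiset String).erase s) := by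
    rw [heq3]; simp
  obtain ⟨t, htmem, htlen⟩ := Multiset.mem_map.1 hbmem
  have htseen : t ∈ seen := Multiset.mem_coe.1 (Multiset.mem_of_mem_erase htmem)
  have hts : t ≠ s := by
    intro hts
    subst hts
    have hc1 : Multiset.count t (↑seen : Multiset String) ≤ 1 := by
      rw [Multiset.coe_count]
      exact List.nodup_iff_count_le_one.1 hnd t
    have : Multiset.count t ((↑seen : Multiset String).erase t)
        = Multiset.count t (↑seen : Multiset String) - 1 := Multiset.count_erase_self _ _
    have hc2 : t ∈ (↑seen : Multiset String).erase t := htmem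
    rw [← Multiset.count_pos] at hc2
    have hc3 : 0 < Multiset.count t (↑seen : Multiset String) :=
      Multiset.count_pos.2 (Multiset.mem_coe.2 htseen)
    omega
  exact ⟨s, t, hsmem, htseen, Ne.symm hts, by omega⟩

-- two distinct values of arr can always be drawn as (dropLast, drop 1) in some order
theorem mem_pair_split {arr : List String} {s t : String} (hs : s ∈ arr)
    (ht : t ∈ arr) (hne : s ≠ t) :
    (s ∈ arr.dropLast ∧ t ∈ arr.drop 1) ∨ (t ∈ arr.dropLast ∧ s ∈ arr.drop 1) := by
  cases arr with
  | nil => cases hs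
  | cons h u =>
    cases u with
    | nil =>
      simp only [List.mem_singleton] at hs ht
      exact absurd (hs.trans ht.symm) hne
    | cons h2 u2 =>
      have hdl : (h :: h2 :: u2).dropLast = h :: (h2 :: u2).dropLast := rfl
      have hdrop : (h :: h2 :: u2).drop 1 = h2 :: u2 := rfl
      by_cases hs1 : s ∈ (h :: h2 :: u2).dropLast
      · by_cases ht1 : t ∈ h2 :: u2
        · exact Or.inl ⟨hs1, by rw [hdrop]; exact ht1⟩
        · have hth : t = h := by
            rcases List.mem_cons.1 ht with h' | h'
            · exact h'
            · exact absurd h' ht1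
          have hst : s ∈ h2 :: u2 := by
            rcases List.mem_cons.1 hs with h' | h'
            · exact absurd (h'.trans hth.symm) hne
            · exact h'
          exact Or.inr ⟨by rw [hdl, hth]; exact List.mem_cons_self .., by rw [hdrop]; exact hst⟩
      · have hne2 : (h2 :: u2 : List String) ≠ [] := by simp
        have hconc : (h :: h2 :: u2).dropLast ++ [(h :: h2 :: u2).getLast (by simp)]
            = h :: h2 :: u2 := List.dropLast_concat_getLast _
        have hs' : s = (h :: h2 :: u2).getLast (by simp) := by
          have hmem := hs
          rw [← hconc] at hmem
          rcases List.mem_append.1 hmem with h' | h'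
          · exact absurd h' hs1
          · simpa using h'
        have hlast : (h :: h2 :: u2).getLast (by simp) ∈ h2 :: u2 := by
          rw [List.getLast_cons hne2]
          exact List.getLast_mem hne2
        have htd : t ∈ (h :: h2 :: u2).dropLast := by
          have hmem := ht
          rw [← hconc] at hmem
          rcases List.mem_append.1 hmem with h' | h'
          · exact h'
          · exact absurd (by simpa using h' : t = _) (hs' ▸ hne ∘ Eq.symm)
        exact Or.inr ⟨htd, by rw [hdrop, hs']; exact hlast⟩

theorem foldl_max_le_of (l : List String) (c init : Int) (h0 : init ≤ c)
    (h : ∀ s ∈ l, PySem.Str.len s ≤ c) :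
    l.foldl (fun acc s => max acc (PySem.Str.len s)) init ≤ c := by
  induction l generalizing init with
  | nil => exact h0
  | cons x t ih =>
    simp only [List.foldl_cons]
    exact ih _ (max_le h0 (h x (by simp))) (fun s hs => h s (by simp [hs]))

theorem pairsOf_mem {arr : List String} {x y : String} (hx : x ∈ arr.dropLast)
    (hy : y ∈ arr.drop 1) (hne : x ≠ y) : x ++ y ∈ pairsOf arr := by
  unfold pairsOf
  rw [List.mem_flatMap]
  refine ⟨x, hx, ?_⟩
  rw [List.mem_map]
  exact ⟨y, List.mem_filter.2 ⟨hy, by simp [hne]⟩, rfl⟩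


-- ===== VERDICT (by name: the statement is the Claim_ definition above) =====
theorem maxLengh_spec : Claim_equal_maxLengh := by
  intro arr _
  unfold Spec_maxLengh
  rw [maxLengh_eq]
  obtain ⟨hinv, hnd, hmem⟩ := bfold arr PySem.Set.empty (-1) (-1)
    ⟨le_refl _, 0, by simp [PySem.Set.empty], by simp⟩ (by simp [PySem.Set.empty])
  simp only [maxLengh_alt]
  set r := arr.foldl maxLenghAltStep (PySem.Set.empty, -1, -1) with hr
  have hmem' : ∀ x, x ∈ r.1 ↔ x ∈ arr := by
    intro x
    rw [hmem x]
    simp [PySem.Set.empty]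
  set a := r.2.1
  set b := r.2.2
  have hab : b ≤ a := hinv.1
  -- the RHS value, case-free bounds
  apply le_antisymm
  · -- A's max is bounded by B's answer
    apply foldl_max_le_of
    · split_ifs <;> omega
    · intro s hsE
      rcases List.mem_append.1 hsE with hsE | hsP
      · rcases List.mem_append.1 hsE with hsE | hsA
        · rw [List.mem_singleton] at hsE
          subst hsE
          rw [str_len_empty]
          split_ifs <;> omega
        · have h1 : PySem.Str.len s ≤ a := mem_le_a hinv ((hmem' s).2 hsA)
          have h2 := str_len_nonneg s
          split_ifs <;> omega
      · obtain ⟨x, hxd, hsm⟩ := List.mem_flatMap.1 hsP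
        obtain ⟨y, hyf, hxy⟩ := List.mem_map.1 hsm
        obtain ⟨hyd, hxyne'⟩ := List.mem_filter.1 hyf
        have hxyne : x ≠ y := by simpa using hxyne'
        have hxa : x ∈ arr := List.dropLast_subset arr hxd
        have hya : y ∈ arr := List.drop_subset 1 arr hyd
        obtain ⟨hsum, hb0⟩ := pair_facts hinv ((hmem' x).2 hxa) ((hmem' y).2 hya) hxyne
        have hlen : PySem.Str.len s = PySem.Str.len x + PySem.Str.len y := by
          rw [← hxy]; exact PySem.Str.len_append x y
        have h0x := str_len_nonneg x
        split_ifs <;> omega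
  · -- B's answer is attained by a candidate of A
    have hbounds := PySem.List.le_foldl_max_int ([""] ++ arr ++ pairsOf arr) PySem.Str.len 0
    split_ifs with h1 h2
    · exact hbounds.1
    · -- 0 ≤ b : a pair of distinct values attains a + b
      obtain ⟨s, t, hsA, htA, hne, hsum⟩ := ab_attained hinv hnd h2
      have hsA' : s ∈ arr := (hmem' s).1 hsA
      have htA' : t ∈ arr := (hmem' t).1 htA
      have key : ∃ u, u ∈ pairsOf arr ∧ PySem.Str.len u = a + b := by
        rcases mem_pair_split hsA' htA' hne with ⟨hd, hr⟩ | ⟨hd, hr⟩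
        · exact ⟨s ++ t, pairsOf_mem hd hr hne, by rw [PySem.Str.len_append]; omega⟩
        · exact ⟨t ++ s, pairsOf_mem hd hr (Ne.symm hne), by rw [PySem.Str.len_append]; omega⟩
      obtain ⟨u, huP, hulen⟩ := key
      have := hbounds.2 u (by
        rw [List.mem_append]
        exact Or.inr huP)
      omega
    · -- b < 0 ≤ a : a single value attains a
      obtain ⟨s, hsA, hslen⟩ := a_attained hinv (by omega)
      have := hbounds.2 s (by
        rw [List.mem_append, List.mem_append]
        exact Or.inl (Or.inr ((hmem' s).1 hsA)))
      omega
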